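-- pv_equiv track=rewrite | github.com/mackwafang/blue_prince_44_puzzle_helper | puzzle_44_grid/helper.py | diff_word
-- ===== SOURCE A (Python) =====
-- from string import ascii_lowercase
--
-- def diff_word(a, b):
-- 	count_a = [0] * 26
-- 	count_b = [0] * 26
--
-- 	for c in a:
-- 		if c in ascii_lowercase:
-- 			count_a[ord(c)-97] += 1
-- 	for c in b:
-- 		if c in ascii_lowercase:
-- 			count_b[ord(c)-97] += 1
-- 	final_count = [abs(count_a[i] - count_b[i]) for i in range(26)]
-- 	return ''.join(chr(index+97) for index, i in enumerate(final_count) if i > 0)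
-- ===== SOURCE B (Python) =====
-- def diff_word(a, b):
--     # Sort the lowercase letters of each string, then cancel common copies with a
--     # two-pointer merge; the surviving letters are exactly those whose counts differ,
--     # already in alphabetical order, so one adjacent dedup yields the answer.
--     xs = sorted(c for c in a if 'a' <= c <= 'z')
--     ys = sorted(c for c in b if 'a' <= c <= 'z')
--     out = []
--     i = j = 0
--     while i < len(xs) and j < len(ys):
--         if xs[i] == ys[j]:
--             i += 1
--             j += 1
--         elif xs[i] < ys[j]:
--             out.append(xs[i])
--             i += 1
--         else:
--             out.append(ys[j])
--             j += 1
--     out.extend(xs[i:])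
--     out.extend(ys[j:])
--     res = []
--     prev = None
--     for c in out:
--         if c != prev:
--             res.append(c)
--         prev = c
--     return ''.join(res)
-- ===== Notes on version B (the rewrite author's own statement) =====
-- stated objective: alternative
-- what changed: Replaces A's two fixed 26-slot count arrays plus abs-subtract-and-enumerate scan with a sort-and-merge scheme: sort the lowercase letters of each string, cancel common copies with a two-pointer merge, and adjacent-dedup the sorted survivors (which are exactly the letters with differing counts, already in alphabetical order).
import Mathlib
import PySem

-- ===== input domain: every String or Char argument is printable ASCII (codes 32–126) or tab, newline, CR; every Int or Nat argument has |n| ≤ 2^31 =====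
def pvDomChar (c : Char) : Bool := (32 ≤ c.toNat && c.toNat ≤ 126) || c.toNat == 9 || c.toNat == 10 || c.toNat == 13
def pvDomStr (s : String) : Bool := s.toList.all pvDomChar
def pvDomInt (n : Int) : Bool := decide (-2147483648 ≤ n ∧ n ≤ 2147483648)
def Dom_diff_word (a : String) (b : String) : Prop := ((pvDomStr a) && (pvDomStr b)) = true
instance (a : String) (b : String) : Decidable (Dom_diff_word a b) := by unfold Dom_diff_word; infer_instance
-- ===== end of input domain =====

-- B replaces A's fixed 26-slot counting arrays and abs-subtract scan by sorting the
-- lowercase letters of each string and cancelling common copies with a two-pointer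
-- merge, then deduplicating the sorted survivors (objective: alternative).

-- ===== PORT A =====
-- string.ascii_lowercase (module-level constant of A)
def asciiLowercase : List Char :=
  ['a','b','c','d','e','f','g','h','i','j','k','l','m','n','o','p','q','r','s','t','u','v','w','x','y','z']

-- loop body of A's counting loops: 'if c in ascii_lowercase: count[ord(c)-97] += 1'
-- (for a single char, Python's substring test 'c in ascii_lowercase' is exactly membership;
--  the guard puts ord(c)-97 in range 0..25, so List.set / List.getD are exact here)
def pvBump (counts : List Int) (c : Char) : List Int :=
  if asciiLowercase.contains c then
    counts.set (c.toNat - 97) (counts.getD (c.toNat - 97) 0 + 1)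
  else counts

def diff_word (a : String) (b : String) : String :=
  let count_a := a.toList.foldl pvBump (List.replicate 26 0)
  let count_b := b.toList.foldl pvBump (List.replicate 26 0)
  let final_count := (List.range 26).map (fun i => |count_a.getD i 0 - count_b.getD i 0|)
  -- ''.join(chr(index+97) for index, i in enumerate(final_count) if i > 0);
  -- the enumerate index is ≥ 0, so chr(index+97) is Char.ofNat (p.1.toNat + 97)
  String.mk (((PySem.List.enumerate final_count 0).filter (fun p => decide (p.2 > 0))).map
    (fun p => Char.ofNat (p.1.toNat + 97)))

-- ===== PORT B =====
-- the while-loop two-pointer merge of Source B: advancing an index = recursing on that list;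
-- the two 'out.extend' tail flushes are the base cases
def pvCancel : List Char → List Char → List Char
  | [], ys => ys
  | x :: xs, [] => x :: xs
  | x :: xs, y :: ys =>
    if x = y then pvCancel xs ys
    else if x < y then x :: pvCancel xs (y :: ys)
    else y :: pvCancel (x :: xs) ys
termination_by xs ys => xs.length + ys.length

-- body of Source B's adjacent-dedup loop, state = (res, prev)
def pvDedupStep (s : List Char × Option Char) (c : Char) : List Char × Option Char :=
  (if some c ≠ s.2 then s.1 ++ [c] else s.1, some c)

def diff_word_alt (a : String) (b : String) : String :=
  let xs := PySem.List.sorted (a.toList.filter (fun c => decide ('a' ≤ c) && decide (c ≤ 'z'))) (fun c => c) false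
  let ys := PySem.List.sorted (b.toList.filter (fun c => decide ('a' ≤ c) && decide (c ≤ 'z'))) (fun c => c) false
  let out := pvCancel xs ys
  String.mk (out.foldl pvDedupStep ([], none)).1

-- ===== PRECONDITION & SPEC =====
def Spec_diff_word (a : String) (b : String) (out : String) : Prop := out = diff_word_alt a b
instance (a : String) (b : String) (out : String) : Decidable (Spec_diff_word a b out) := by unfold Spec_diff_word; infer_instance

-- ===== CLAIM (what is proved, stated in full; the proofs are below) =====
def Claim_equal_diff_word : Prop := ∀ (a : String) (b : String), Dom_diff_word a b → Spec_diff_word a b (diff_word a b)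

-- ===== LEMMAS AND PROOFS =====

-- the target both sides are reduced to
def pvTarget (a : String) (b : String) : List Char :=
  asciiLowercase.filter (fun c => decide (a.toList.count c ≠ b.toList.count c))

lemma mem_asciiLowercase (c : Char) :
    asciiLowercase.contains c = true ↔ 97 ≤ c.toNat ∧ c.toNat ≤ 122 := by
  constructor
  · intro h
    rw [List.contains_iff_mem] at h
    fin_cases h <;> decide
  · rintro ⟨h1, h2⟩
    rw [List.contains_iff_mem]
    have hc : Char.ofNat c.toNat = c := Char.ofNat_toNat c
    set n := c.toNat with hn
    rw [← hc]
    interval_cases n <;> decide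

lemma letter_iff (c : Char) :
    ((decide ('a' ≤ c) && decide (c ≤ 'z')) = true) ↔ 97 ≤ c.toNat ∧ c.toNat ≤ 122 := by
  simp only [Bool.and_eq_true, decide_eq_true_eq, Char.le_def, UInt32.le_iff_toNat_le, Char.toNat]
  constructor <;> exact fun h => ⟨h.1, h.2⟩

lemma toNat_ofNat_lower (i : Nat) (hi : i < 26) : (Char.ofNat (97 + i)).toNat = 97 + i := by
  rw [Char.toNat_ofNat, if_pos]; left; omega

lemma char_eq_of_toNat (c d : Char) (h : c.toNat = d.toNat) : c = d := by
  apply Char.ext; exact UInt32.toNat_inj.mp h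

lemma length_pvBump (counts : List Int) (c : Char) : (pvBump counts c).length = counts.length := by
  unfold pvBump; split <;> simp

-- one step of the counting loop, read back at slot i
lemma getD_pvBump (counts : List Int) (c : Char) (h : counts.length = 26) (i : Nat) (hi : i < 26) :
    (pvBump counts c).getD i 0 =
      counts.getD i 0 + (if c = Char.ofNat (97 + i) then 1 else 0) := by
  unfold pvBump
  split
  · rename_i hmem
    rw [mem_asciiLowercase] at hmem
    by_cases heq : c.toNat - 97 = i
    · have hceq : c = Char.ofNat (97 + i) := by
        apply char_eq_of_toNat
        rw [toNat_ofNat_lower i hi]; omega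
      rw [if_pos hceq, ← heq]
      rw [List.getD_eq_getElem?_getD, List.getD_eq_getElem?_getD,
          List.getElem?_set_self (by omega), Option.getD_some]
    · have hne : c ≠ Char.ofNat (97 + i) := by
        intro hc; apply heq
        have := toNat_ofNat_lower i hi
        rw [hc, this]; omega
      rw [if_neg hne]
      simp [List.getD_eq_getElem?_getD, List.getElem?_set_ne (by omega)]
  · rename_i hmem
    have hne : c ≠ Char.ofNat (97 + i) := by
      intro hc
      apply hmem
      rw [mem_asciiLowercase, hc, toNat_ofNat_lower i hi]; omega
    simp [if_neg hne]

-- A's counting fold reads back the plain character count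
lemma foldl_bump_getD (xs : List Char) (counts : List Int) (h : counts.length = 26)
    (i : Nat) (hi : i < 26) :
    (xs.foldl pvBump counts).getD i 0 = counts.getD i 0 + (xs.count (Char.ofNat (97 + i)) : Int) := by
  induction xs generalizing counts with
  | nil => simp
  | cons c xs ih =>
    simp only [List.foldl_cons, List.count_cons]
    rw [ih _ (by rw [length_pvBump, h]), getD_pvBump counts c h i hi]
    by_cases hc : c = Char.ofNat (97 + i) <;> simp [hc] <;> ring

lemma enumerate_map_range (f : Nat → Int) (n : Nat) :
    PySem.List.enumerate ((List.range n).map f) 0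
      = (List.range n).map (fun (i : Nat) => ((i : Int), f i)) := by
  induction n with
  | zero => simp [PySem.List.enumerate_nil]
  | succ n ih =>
    rw [List.range_succ, List.map_append, PySem.List.enumerate_append, ih]
    simp

lemma filter_map' {α β : Type} (l : List α) (f : α → β) (p : β → Bool) :
    (l.map f).filter p = (l.filter (fun x => p (f x))).map f := by
  induction l with
  | nil => rfl
  | cons x xs ih => by_cases h : p (f x) <;> simp [h, ih]

lemma asciiLowercase_eq_range :
    asciiLowercase = (List.range 26).map (fun i => Char.ofNat (97 + i)) := by decide

-- A computes the alphabet filtered by differing counts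
lemma A_eq_target (a b : String) : diff_word a b = String.mk (pvTarget a b) := by
  unfold diff_word pvTarget
  simp only []
  apply congrArg String.mk
  rw [enumerate_map_range, filter_map', List.map_map, asciiLowercase_eq_range, filter_map']
  have hmaps :
      ((fun p : Int × Int => Char.ofNat (p.1.toNat + 97)) ∘ fun (i : Nat) => ((i : Int), _root_.abs
        ((a.toList.foldl pvBump (List.replicate 26 0)).getD i 0
          - (b.toList.foldl pvBump (List.replicate 26 0)).getD i 0)))
      = (fun i : Nat => Char.ofNat (97 + i)) := by
    funext i; simp [Nat.add_comm]
  rw [hmaps]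
  apply congrArg
  apply List.filter_congr
  intro i hi
  rw [List.mem_range] at hi
  have hA := foldl_bump_getD a.toList (List.replicate 26 0) (by simp) i hi
  have hB := foldl_bump_getD b.toList (List.replicate 26 0) (by simp) i hi
  have h0 : (List.replicate 26 (0:Int)).getD i 0 = 0 := by interval_cases i <;> rfl
  rw [h0] at hA hB
  simp only [hA, hB, zero_add, decide_eq_decide]
  rw [gt_iff_lt, abs_pos, sub_ne_zero]
  exact ⟨fun h hc => h (by exact_mod_cast hc), fun h hc => h (by exact_mod_cast hc)⟩

-- ---- B side ----

-- every survivor of the merge came from one of the inputs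
lemma pvCancel_subset (xs ys : List Char) : ∀ c : Char, c ∈ pvCancel xs ys → c ∈ xs ∨ c ∈ ys := by
  induction xs, ys using pvCancel.induct with
  | case1 ys => intro c h; right; simpa [pvCancel] using h
  | case2 x xs => intro c h; left; simpa [pvCancel] using h
  | case3 xs y ys ih =>
    intro c h
    rw [pvCancel, if_pos rfl] at h
    rcases ih c h with h | h
    · exact Or.inl (List.mem_cons_of_mem _ h)
    · exact Or.inr (List.mem_cons_of_mem _ h)
  | case4 x xs y ys hne hlt ih =>
    intro c h
    rw [pvCancel, if_neg hne, if_pos hlt] at h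
    rcases List.mem_cons.mp h with h | h
    · exact Or.inl (h ▸ List.mem_cons_self)
    · rcases ih c h with h | h
      · exact Or.inl (List.mem_cons_of_mem _ h)
      · exact Or.inr h
  | case5 x xs y ys hne hlt ih =>
    intro c h
    rw [pvCancel, if_neg hne, if_neg hlt] at h
    rcases List.mem_cons.mp h with h | h
    · exact Or.inr (h ▸ List.mem_cons_self)
    · rcases ih c h with h | h
      · exact Or.inl h
      · exact Or.inr (List.mem_cons_of_mem _ h)

-- the merge of sorted lists is sorted
lemma pvCancel_sorted (xs ys : List Char)
    (hx : xs.Pairwise (· ≤ ·)) (hy : ys.Pairwise (· ≤ ·)) :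
    (pvCancel xs ys).Pairwise (· ≤ ·) := by
  induction xs, ys using pvCancel.induct with
  | case1 ys => simpa [pvCancel] using hy
  | case2 x xs => simpa [pvCancel] using hx
  | case3 xs y ys ih =>
    rw [pvCancel, if_pos rfl]
    exact ih (List.pairwise_cons.mp hx).2 (List.pairwise_cons.mp hy).2
  | case4 x xs y ys hne hlt ih =>
    rw [pvCancel, if_neg hne, if_pos hlt]
    obtain ⟨hx1, hx2⟩ := List.pairwise_cons.mp hx
    refine List.pairwise_cons.mpr ⟨?_, ih hx2 hy⟩
    intro z hz
    rcases pvCancel_subset _ _ z hz with h | h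
    · exact hx1 z h
    · rcases List.mem_cons.mp h with h | h
      · exact le_of_lt (h ▸ hlt)
      · exact le_of_lt (lt_of_lt_of_le hlt ((List.pairwise_cons.mp hy).1 z h))
  | case5 x xs y ys hne hlt ih =>
    rw [pvCancel, if_neg hne, if_neg hlt]
    obtain ⟨hy1, hy2⟩ := List.pairwise_cons.mp hy
    have hyx : y < x := lt_of_le_of_ne (le_of_not_gt hlt) (fun h => hne h.symm)
    refine List.pairwise_cons.mpr ⟨?_, ih hx hy2⟩
    intro z hz
    rcases pvCancel_subset _ _ z hz with h | h
    · rcases List.mem_cons.mp h with h | h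
      · exact le_of_lt (h ▸ hyx)
      · exact le_of_lt (lt_of_lt_of_le hyx ((List.pairwise_cons.mp hx).1 z h))
    · exact hy1 z h

-- survivors of the merge = letters with differing multiplicity
lemma pvCancel_count (xs ys : List Char)
    (hx : xs.Pairwise (· ≤ ·)) (hy : ys.Pairwise (· ≤ ·)) (c : Char) :
    c ∈ pvCancel xs ys ↔ xs.count c ≠ ys.count c := by
  induction xs, ys using pvCancel.induct generalizing c with
  | case1 ys =>
    simp only [pvCancel, List.count_nil]
    rw [← List.count_pos_iff]
    omega
  | case2 x xs =>
    simp only [pvCancel, List.count_nil]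
    rw [← List.count_pos_iff]
    omega
  | case3 xs y ys ih =>
    rw [pvCancel, if_pos rfl,
        ih (List.pairwise_cons.mp hx).2 (List.pairwise_cons.mp hy).2 c]
    simp only [List.count_cons]
    by_cases h : y = c <;> simp [h]
  | case4 x xs y ys hne hlt ih =>
    rw [pvCancel, if_neg hne, if_pos hlt]
    obtain ⟨hx1, hx2⟩ := List.pairwise_cons.mp hx
    have hxnotin : x ∉ y :: ys := by
      intro h
      rcases List.mem_cons.mp h with h | h
      · exact absurd (h ▸ hlt) (lt_irrefl _)
      · exact absurd (lt_of_lt_of_le hlt ((List.pairwise_cons.mp hy).1 x h)) (lt_irrefl _)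
    by_cases hcx : c = x
    · subst hcx
      simp only [List.mem_cons, true_or, true_iff]
      rw [List.count_eq_zero.mpr hxnotin, List.count_cons_self]
      omega
    · rw [List.mem_cons, or_iff_right hcx, ih hx2 hy c]
      simp only [List.count_cons, beq_iff_eq, if_neg (fun h => hcx (Eq.symm h)), Nat.add_zero]
  | case5 x xs y ys hne hlt ih =>
    rw [pvCancel, if_neg hne, if_neg hlt]
    obtain ⟨hy1, hy2⟩ := List.pairwise_cons.mp hy
    have hyx : y < x := lt_of_le_of_ne (le_of_not_gt hlt) (fun h => hne h.symm)
    have hynotin : y ∉ x :: xs := by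
      intro h
      rcases List.mem_cons.mp h with h | h
      · exact absurd (h ▸ hyx) (lt_irrefl _)
      · exact absurd (lt_of_lt_of_le hyx ((List.pairwise_cons.mp hx).1 y h)) (lt_irrefl _)
    by_cases hcy : c = y
    · subst hcy
      simp only [List.mem_cons, true_or, true_iff]
      rw [List.count_eq_zero.mpr hynotin, List.count_cons_self]
      omega
    · rw [List.mem_cons, or_iff_right hcy, ih hx hy2 c]
      simp only [List.count_cons, beq_iff_eq, if_neg (fun h => hcy (Eq.symm h)), Nat.add_zero]

-- recursion computed by Source B's dedup loop
def pvDD (prev : Option Char) : List Char → List Char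
  | [] => []
  | c :: cs => if some c ≠ prev then c :: pvDD (some c) cs else pvDD (some c) cs

lemma foldl_pvDedupStep (l : List Char) (acc : List Char) (prev : Option Char) :
    (l.foldl pvDedupStep (acc, prev)).1 = acc ++ pvDD prev l := by
  induction l generalizing acc prev with
  | nil => simp [pvDD]
  | cons c cs ih =>
    rw [List.foldl_cons]
    by_cases h : some c ≠ prev
    · rw [show pvDedupStep (acc, prev) c = (acc ++ [c], some c) from by simp [pvDedupStep, h], ih,
          pvDD, if_pos h, List.append_assoc, List.singleton_append]
    · rw [show pvDedupStep (acc, prev) c = (acc, some c) from by simp [pvDedupStep, h], ih,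
          pvDD, if_neg h]

lemma pvDD_sublist (prev : Option Char) (l : List Char) : List.Sublist (pvDD prev l) l := by
  induction l generalizing prev with
  | nil => simp [pvDD]
  | cons c cs ih =>
    rw [pvDD]
    split
    · exact List.Sublist.cons₂ c (ih (some c))
    · exact List.Sublist.cons c (ih (some c))

lemma pvDD_mem (l : List Char) (hl : l.Pairwise (· ≤ ·)) (prev : Option Char)
    (hlb : ∀ p, prev = some p → ∀ x ∈ l, p ≤ x) (c : Char) :
    c ∈ pvDD prev l ↔ c ∈ l ∧ some c ≠ prev := by
  induction l generalizing prev with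
  | nil => simp [pvDD]
  | cons x cs ih =>
    obtain ⟨hl1, hl2⟩ := List.pairwise_cons.mp hl
    have hlb' : ∀ p, some x = some p → ∀ z ∈ cs, p ≤ z := by
      rintro p hp z hz
      injection hp with hp; exact hp ▸ hl1 z hz
    rw [pvDD]
    split
    · rename_i hne
      rw [List.mem_cons, List.mem_cons, ih hl2 (some x) hlb']
      constructor
      · rintro (h | ⟨h1, h2⟩)
        · exact ⟨Or.inl h, h ▸ hne⟩
        · refine ⟨Or.inr h1, ?_⟩
          rcases hp : prev with _ | p
          · simp
          · have hpx : p ≤ x := hlb p hp x List.mem_cons_self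
            have hxc : x ≤ c := hl1 c h1
            have : c ≠ x := fun he => h2 (by simp [he])
            have hpc : p < c := lt_of_le_of_lt hpx (lt_of_le_of_ne hxc (Ne.symm this))
            exact fun he => absurd ((Option.some_inj.mp he) ▸ hpc) (lt_irrefl _)
      · rintro ⟨h1 | h1, h2⟩
        · exact Or.inl h1
        · by_cases hcx : c = x
          · exact Or.inl hcx
          · exact Or.inr ⟨h1, by simp [hcx]⟩
    · rename_i hne
      simp only [not_not] at hne
      rw [ih hl2 (some x) hlb', ← hne, List.mem_cons]
      constructor
      · rintro ⟨h1, h2⟩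
        exact ⟨Or.inr h1, h2⟩
      · rintro ⟨h1 | h1, h2⟩
        · exact absurd (by simp [h1]) h2
        · exact ⟨h1, h2⟩

lemma pvDD_nodup (l : List Char) (hl : l.Pairwise (· ≤ ·)) (prev : Option Char)
    (hlb : ∀ p, prev = some p → ∀ x ∈ l, p ≤ x) : (pvDD prev l).Nodup := by
  induction l generalizing prev with
  | nil => simp [pvDD]
  | cons x cs ih =>
    obtain ⟨hl1, hl2⟩ := List.pairwise_cons.mp hl
    have hlb' : ∀ p, some x = some p → ∀ z ∈ cs, p ≤ z := by
      rintro p hp z hz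
      injection hp with hp; exact hp ▸ hl1 z hz
    rw [pvDD]
    split
    · refine List.nodup_cons.mpr ⟨?_, ih hl2 (some x) hlb'⟩
      intro hmem
      exact ((pvDD_mem cs hl2 (some x) hlb' x).mp hmem).2 rfl
    · exact ih hl2 (some x) hlb'

lemma count_filter_of_pos (l : List Char) (p : Char → Bool) (c : Char) (h : p c = true) :
    (l.filter p).count c = l.count c := by
  induction l with
  | nil => rfl
  | cons x xs ih =>
    by_cases hp : p x
    · simp [hp, List.count_cons, ih]
    · have : ¬ x = c := fun hx => hp (hx ▸ h)
      simp [hp, ih, this]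

-- the multiplicity of c in the sorted lowercase-filter of s
lemma count_sorted_filter (s : String) (c : Char) :
    (PySem.List.sorted (s.toList.filter (fun c => decide ('a' ≤ c) && decide (c ≤ 'z'))) (fun c => c) false).count c
      = (s.toList.filter (fun c => decide ('a' ≤ c) && decide (c ≤ 'z'))).count c :=
  (PySem.List.sorted_perm _ _ _).count_eq c

-- B computes the alphabet filtered by differing counts
lemma B_eq_target (a b : String) : diff_word_alt a b = String.mk (pvTarget a b) := by
  unfold diff_word_alt pvTarget
  simp only []
  rw [foldl_pvDedupStep, List.nil_append]
  apply congrArg String.mk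
  have hx := PySem.List.sorted_pairwise (a.toList.filter (fun c => decide ('a' ≤ c) && decide (c ≤ 'z'))) (fun c => c)
  have hy := PySem.List.sorted_pairwise (b.toList.filter (fun c => decide ('a' ≤ c) && decide (c ≤ 'z'))) (fun c => c)
  have hout := pvCancel_sorted _ _ hx hy
  have hlb0 : ∀ p : Char, (none : Option Char) = some p →
      ∀ x ∈ pvCancel (PySem.List.sorted (a.toList.filter (fun c => decide ('a' ≤ c) && decide (c ≤ 'z'))) (fun c => c) false)
        (PySem.List.sorted (b.toList.filter (fun c => decide ('a' ≤ c) && decide (c ≤ 'z'))) (fun c => c) false), p ≤ x := by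
    intro p hp; cases hp
  have halphaS : asciiLowercase.Pairwise (· ≤ ·) := by decide
  have halphaN : asciiLowercase.Nodup := by decide
  have hmem : ∀ c : Char,
      c ∈ pvDD none (pvCancel (PySem.List.sorted (a.toList.filter (fun c => decide ('a' ≤ c) && decide (c ≤ 'z'))) (fun c => c) false)
        (PySem.List.sorted (b.toList.filter (fun c => decide ('a' ≤ c) && decide (c ≤ 'z'))) (fun c => c) false))
      ↔ c ∈ asciiLowercase.filter (fun c => decide (a.toList.count c ≠ b.toList.count c)) := by
    intro c
    rw [pvDD_mem _ hout none hlb0 c]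
    simp only [ne_eq, Option.some_ne_none, not_false_iff, and_true]
    rw [pvCancel_count _ _ hx hy c, count_sorted_filter, count_sorted_filter, List.mem_filter]
    by_cases hp : (decide ('a' ≤ c) && decide (c ≤ 'z')) = true
    · rw [count_filter_of_pos _ _ _ hp, count_filter_of_pos _ _ _ hp]
      have hmemA : c ∈ asciiLowercase := by
        rw [← List.contains_iff_mem, mem_asciiLowercase, ← letter_iff]; exact hp
      simp [hmemA]
    · have h0a : (a.toList.filter (fun c => decide ('a' ≤ c) && decide (c ≤ 'z'))).count c = 0 := by
        rw [List.count_eq_zero]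
        intro hmm
        exact hp (List.mem_filter.mp hmm).2
      have h0b : (b.toList.filter (fun c => decide ('a' ≤ c) && decide (c ≤ 'z'))).count c = 0 := by
        rw [List.count_eq_zero]
        intro hmm
        exact hp (List.mem_filter.mp hmm).2
      have hnm : c ∉ asciiLowercase := by
        rw [← List.contains_iff_mem]
        intro hc
        exact hp (letter_iff c |>.mpr ((mem_asciiLowercase c).mp hc))
      simp [h0a, h0b, hnm]
  refine List.Perm.eq_of_pairwise (fun _ _ _ _ h1 h2 => le_antisymm h1 h2)
    (List.Pairwise.sublist (pvDD_sublist none _) hout)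
    (List.Pairwise.filter _ halphaS)
    (List.perm_ext_iff_of_nodup (pvDD_nodup _ hout none hlb0) (List.Nodup.filter _ halphaN) |>.mpr hmem)

-- ===== VERDICT (by name: the statement is the Claim_ definition above) =====
theorem diff_word_spec : Claim_equal_diff_word := by
  intro a b _
  unfold Spec_diff_word
  rw [A_eq_target, B_eq_target]
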